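-- pv_equiv track=rewrite | github.com/AlexKitipov/AGC_256_Fractal_container_v.5 | archive/AGC_256_Fractal_container_v.5.py | decode_nucleotide_sequence_to_string_v1
-- ===== SOURCE A (Python) =====
-- nuc_to_int = {
--     'C': 0,
--     'T': 1,
--     'A': 2,
--     'G': 3
-- }
--
-- def decode_nucleotide_sequence_to_string_v1(nucleotide_sequence):
--     """
--     4 нуклеотида -> 4x2 бита -> 8-битов ASCII.
--     """
--     decoded_chars = []
--     for i in range(0, len(nucleotide_sequence), 4):
--         chunk = nucleotide_sequence[i:i+4]
--         if len(chunk) != 4: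
--             # Warning already handled in GUI if length mismatch
--             break
--
--         # Convert each nucleotide to its 2-bit integer representation
--         b1 = nuc_to_int[chunk[0]]
--         b2 = nuc_to_int[chunk[1]]
--         b3 = nuc_to_int[chunk[2]]
--         b4 = nuc_to_int[chunk[3]]
--
--         # Combine the four 2-bit integers to form a single 8-bit integer
--         ascii_val = (b1 << 6) | (b2 << 4) | (b3 << 2) | b4
--         decoded_chars.append(chr(ascii_val))
--     return "".join(decoded_chars)
-- ===== SOURCE B (Python) =====
-- nuc_to_int = {
--     'C': 0,
--     'T': 1,
--     'A': 2,
--     'G': 3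
-- }
--
-- def decode_nucleotide_sequence_to_string_v1(nucleotide_sequence):
--     # One flat pass: truncate to whole 4-chunks, map every nucleotide to its
--     # 2-bit value, then accumulate base-4 digits, emitting a char every 4th digit.
--     prefix = nucleotide_sequence[: len(nucleotide_sequence) - len(nucleotide_sequence) % 4]
--     vals = [nuc_to_int[c] for c in prefix]
--     out = []
--     acc = 0
--     for k, v in enumerate(vals):
--         acc = acc * 4 + v
--         if k % 4 == 3:
--             out.append(chr(acc))
--             acc = 0
--     return "".join(out)
-- ===== Notes on version B (the rewrite author's own statement) =====
-- stated objective: alternative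
-- what changed: Replaces A's chunk-by-chunk loop (slice of 4, four indexed dict lookups, shift/or combine) by a single flat pass: truncate to whole chunks, map every nucleotide to its 2-bit value, then fold the value stream as base-4 digits emitting a character every fourth digit.
import Mathlib
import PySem

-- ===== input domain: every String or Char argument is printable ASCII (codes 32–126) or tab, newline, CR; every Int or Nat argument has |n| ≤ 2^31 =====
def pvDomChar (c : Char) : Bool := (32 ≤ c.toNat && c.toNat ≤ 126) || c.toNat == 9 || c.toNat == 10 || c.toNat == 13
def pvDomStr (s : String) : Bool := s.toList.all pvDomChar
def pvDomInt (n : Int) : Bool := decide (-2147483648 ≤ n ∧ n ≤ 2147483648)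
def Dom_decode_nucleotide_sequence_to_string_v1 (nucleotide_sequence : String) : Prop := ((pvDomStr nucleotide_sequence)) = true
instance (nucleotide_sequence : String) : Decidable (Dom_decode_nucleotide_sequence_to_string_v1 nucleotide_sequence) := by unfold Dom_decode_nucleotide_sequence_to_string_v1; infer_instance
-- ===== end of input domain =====

-- B decodes via one flat pass (map nucleotides to 2-bit values, fold the stream as base-4 digits) instead of A's chunk-of-4 loop with shift/or packing; equal wherever A returns (Pre_ excludes the KeyError inputs).


-- ===== PORT A =====
-- nuc_to_int as a PySem.Dict; a lookup failure is a Python KeyError, excluded by Pre_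
-- (the .getD default 0 only makes the function total; it is never reached under Pre_).
def nuc_to_int : PySem.Dict Char Int :=
  PySem.Dict.ofList [('C', 0), ('T', 1), ('A', 2), ('G', 3)]

def nucVal (c : Char) : Int := PySem.Dict.getD nuc_to_int c 0

-- the range(0, len, 4) loop with its break on a short chunk: each iteration consumes
-- the next 4 chars (chunk = s[i:i+4]); a chunk shorter than 4 stops the loop.
def decodeGoA : List Char → List Char
  | c1 :: c2 :: c3 :: c4 :: rest =>
      Char.ofNat ((((nucVal c1 <<< (6:Nat)).lor (nucVal c2 <<< (4:Nat))).lor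
                    ((nucVal c3 <<< (2:Nat)).lor (nucVal c4))).toNat)
        :: decodeGoA rest
  | _ => []

def decode_nucleotide_sequence_to_string_v1 (nucleotide_sequence : String) : String :=
  String.ofList (decodeGoA nucleotide_sequence.toList)

-- ===== PORT B =====
-- step of B's flat fold: state = (acc, out); every 4th 2-bit digit flushes acc as a char
def decodeStepB (st : Int × List Char) (kv : Int × Int) : Int × List Char :=
  let acc := st.1 * 4 + kv.2
  if kv.1 % 4 == 3 then (0, st.2 ++ [Char.ofNat acc.toNat]) else (acc, st.2)

def decode_nucleotide_sequence_to_string_v1_alt (nucleotide_sequence : String) : String :=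
  String.ofList
    ((PySem.List.enumerate
        ((nucleotide_sequence.toList.take
            (nucleotide_sequence.toList.length - nucleotide_sequence.toList.length % 4)).map nucVal) 0).foldl
      decodeStepB (0, [])).2

-- ===== PRECONDITION & SPEC =====
-- Pre_ excludes exactly the inputs where A raises KeyError: a character outside
-- the nucleotide alphabet inside the whole-chunk prefix s[: len - len % 4] (B raises there too).
def Pre_decode_nucleotide_sequence_to_string_v1 (nucleotide_sequence : String) : Prop :=
  (nucleotide_sequence.toList.take
      (nucleotide_sequence.toList.length - nucleotide_sequence.toList.length % 4)).all
    (fun c => c == 'C' || c == 'T' || c == 'A' || c == 'G') = true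
instance (nucleotide_sequence : String) : Decidable (Pre_decode_nucleotide_sequence_to_string_v1 nucleotide_sequence) := by unfold Pre_decode_nucleotide_sequence_to_string_v1; infer_instance

def pvWitness_decode_nucleotide_sequence_to_string_v1 : String := "GGGACTAC"

def Spec_decode_nucleotide_sequence_to_string_v1 (nucleotide_sequence : String) (out : String) : Prop := out = decode_nucleotide_sequence_to_string_v1_alt nucleotide_sequence
instance (nucleotide_sequence : String) (out : String) : Decidable (Spec_decode_nucleotide_sequence_to_string_v1 nucleotide_sequence out) := by unfold Spec_decode_nucleotide_sequence_to_string_v1; infer_instance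

-- ===== CLAIM (what is proved, stated in full; the proofs are below) =====
def Claim_equal_decode_nucleotide_sequence_to_string_v1 : Prop := ∀ (nucleotide_sequence : String), Dom_decode_nucleotide_sequence_to_string_v1 nucleotide_sequence → Pre_decode_nucleotide_sequence_to_string_v1 nucleotide_sequence → Spec_decode_nucleotide_sequence_to_string_v1 nucleotide_sequence (decode_nucleotide_sequence_to_string_v1 nucleotide_sequence)

-- ===== LEMMAS AND PROOFS =====

lemma nuc_to_int_mk : nuc_to_int = PySem.Dict.mk [('C', 0), ('T', 1), ('A', 2), ('G', 3)] := by
  decide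

lemma nucVal_cases (c : Char) : nucVal c = 0 ∨ nucVal c = 1 ∨ nucVal c = 2 ∨ nucVal c = 3 := by
  rw [nucVal, PySem.Dict.getD, nuc_to_int_mk]
  by_cases h1 : ('C' == c) = true <;> by_cases h2 : ('T' == c) = true <;>
    by_cases h3 : ('A' == c) = true <;> by_cases h4 : ('G' == c) = true <;>
    simp [h1, h2, h3, h4, PySem.Dict.get?]

-- A's shift/or packing equals B's base-4 Horner accumulation, for 2-bit digits
lemma pack_eq (a b c d : Int)
    (ha : a = 0 ∨ a = 1 ∨ a = 2 ∨ a = 3) (hb : b = 0 ∨ b = 1 ∨ b = 2 ∨ b = 3)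
    (hc : c = 0 ∨ c = 1 ∨ c = 2 ∨ c = 3) (hd : d = 0 ∨ d = 1 ∨ d = 2 ∨ d = 3) :
    ((a <<< (6:Nat)).lor (b <<< (4:Nat))).lor ((c <<< (2:Nat)).lor d)
      = ((((0 : Int) * 4 + a) * 4 + b) * 4 + c) * 4 + d := by
  rcases ha with rfl | rfl | rfl | rfl <;> rcases hb with rfl | rfl | rfl | rfl <;>
    rcases hc with rfl | rfl | rfl | rfl <;> rcases hd with rfl | rfl | rfl | rfl <;> decide

lemma decode_main (cs : List Char) (n : Int) (out : List Char) (hn : n % 4 = 0) (hnn : 0 ≤ n) :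
    ((PySem.List.enumerate ((cs.take (cs.length - cs.length % 4)).map nucVal) n).foldl
        decodeStepB (0, out)).2 = out ++ decodeGoA cs := by
  induction cs using decodeGoA.induct generalizing n out with
  | case1 c1 c2 c3 c4 rest ih =>
      have hlen : (c1 :: c2 :: c3 :: c4 :: rest).length - (c1 :: c2 :: c3 :: c4 :: rest).length % 4
          = (rest.length - rest.length % 4) + 1 + 1 + 1 + 1 := by
        simp only [List.length_cons]; omega
      rw [hlen]
      simp only [List.take_succ_cons, List.map_cons, PySem.List.enumerate_cons, List.foldl_cons]
      have h0 : ((n % 4 == 3) : Bool) = false := by simp; omega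
      have h1 : (((n + 1) % 4 == 3) : Bool) = false := by simp; omega
      have h2 : (((n + 1 + 1) % 4 == 3) : Bool) = false := by simp; omega
      have h3 : (((n + 1 + 1 + 1) % 4 == 3) : Bool) = true := by simp; omega
      simp only [decodeStepB, h0, h1, h2, h3, if_true, if_false, Bool.false_eq_true]
      rw [ih (n + 1 + 1 + 1 + 1) _ (by omega) (by omega)]
      rw [decodeGoA]
      rw [pack_eq _ _ _ _ (nucVal_cases c1) (nucVal_cases c2) (nucVal_cases c3) (nucVal_cases c4)]
      simp
  | case2 cs h =>
      have h0 : cs.length - cs.length % 4 = 0 := by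
        match cs, h with
        | [], _ => simp
        | [a], _ => simp
        | [a, b], _ => simp
        | [a, b, c], _ => simp
        | a :: b :: c :: d :: t, h => exact absurd rfl (h a b c d t)
      have h1 : decodeGoA cs = [] := by
        match cs, h with
        | [], _ => rfl
        | [a], _ => rfl
        | [a, b], _ => rfl
        | [a, b, c], _ => rfl
        | a :: b :: c :: d :: t, h => exact absurd rfl (h a b c d t)
      rw [h0, h1]
      simp [PySem.List.enumerate_nil]

-- ===== VERDICT (by name: the statement is the Claim_ definition above) =====
theorem decode_nucleotide_sequence_to_string_v1_spec : Claim_equal_decode_nucleotide_sequence_to_string_v1 := by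
  intro s _ _
  unfold Spec_decode_nucleotide_sequence_to_string_v1
  unfold decode_nucleotide_sequence_to_string_v1 decode_nucleotide_sequence_to_string_v1_alt
  rw [decode_main s.toList 0 [] (by decide) (by decide)]
  simp
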